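-- pv_equiv track=rewrite | github.com/marijanedjalkova/advent-of-code | Day2/1-1.py | getTwosAndThrees
-- ===== SOURCE A (Python) =====
-- def getTwosAndThrees(line):
--     hashset = {}
--     twosExist = threesExist = False
--     for char in line:
--         if char in hashset:
--             hashset[char] += 1
--         else:
--             hashset[char] = 1
--     values = hashset.values()
--     return int(2 in values), int(3 in values)
-- ===== SOURCE B (Python) =====
-- def getTwosAndThrees(line):
--     # sort the characters so equal ones are adjacent, then scan runs
--     s = sorted(line)
--     twos = threes = False
--     i = 0
--     n = len(s)
--     while i < n:
--         j = i + 1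
--         while j < n and s[j] == s[i]:
--             j += 1
--         run = j - i
--         if run == 2:
--             twos = True
--         elif run == 3:
--             threes = True
--         i = j
--     return int(twos), int(threes)
-- ===== Notes on version B (the rewrite author's own statement) =====
-- stated objective: alternative
-- what changed: Replaces A's single-pass frequency-dict build plus values-membership test with sort-then-scan: sort the characters so equal ones are adjacent, then one scan over runs of equal characters sets a flag when a run has length 2 or 3.
import Mathlib
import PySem

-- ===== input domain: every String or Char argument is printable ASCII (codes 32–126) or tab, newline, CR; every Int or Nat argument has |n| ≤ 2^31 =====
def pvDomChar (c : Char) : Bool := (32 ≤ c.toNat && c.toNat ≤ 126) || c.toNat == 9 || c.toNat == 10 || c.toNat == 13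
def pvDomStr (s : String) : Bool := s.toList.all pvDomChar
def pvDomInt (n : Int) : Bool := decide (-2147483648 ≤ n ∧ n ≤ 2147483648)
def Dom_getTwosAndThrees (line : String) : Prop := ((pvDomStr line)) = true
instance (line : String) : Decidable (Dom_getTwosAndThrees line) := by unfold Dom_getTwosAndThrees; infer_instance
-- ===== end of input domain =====

-- B sorts the characters and scans runs of adjacent equal characters, flagging run lengths 2 and 3,
-- instead of A's single pass building a frequency dict and testing 2/3 against its values.

-- ===== PORT A =====
def getTwosAndThrees (line : String) : Int × Int :=
  let hashset : PySem.Dict Char Int :=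
    line.toList.foldl
      (fun d ch => if d.contains ch then d.modify ch 0 (· + 1) else d.insert ch 1)
      PySem.Dict.empty
  let values := hashset.values
  ((if (2 : Int) ∈ values then 1 else 0), (if (3 : Int) ∈ values then 1 else 0))

-- ===== PORT B =====
-- the outer while loop of Source B: consume one run of equal characters per step
-- (the inner `while j < n and s[j] == s[i]` is the takeWhile/dropWhile split of the tail)
def pvRunLoop : List Char → Bool → Bool → Bool × Bool
  | [], t, th => (t, th)
  | c :: rest, t, th =>
      let run := (rest.takeWhile (fun x => x == c)).length + 1
      let rest' := rest.dropWhile (fun x => x == c)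
      if run = 2 then pvRunLoop rest' true th
      else if run = 3 then pvRunLoop rest' t true
      else pvRunLoop rest' t th
  termination_by l => l.length
  decreasing_by
    all_goals
      exact Nat.lt_succ_of_le (List.length_dropWhile_le _ _)

-- structural facts about one run of a sorted list

def getTwosAndThrees_alt (line : String) : Int × Int :=
  let s := PySem.List.sorted line.toList (fun c => c) false
  let fl := pvRunLoop s false false
  ((if fl.1 then 1 else 0), (if fl.2 then 1 else 0))

-- ===== PRECONDITION & SPEC =====
def Spec_getTwosAndThrees (line : String) (out : Int × Int) : Prop := out = getTwosAndThrees_alt line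
instance (line : String) (out : Int × Int) : Decidable (Spec_getTwosAndThrees line out) := by unfold Spec_getTwosAndThrees; infer_instance

-- ===== CLAIM (what is proved, stated in full; the proofs are below) =====
def Claim_equal_getTwosAndThrees : Prop := ∀ (line : String), Dom_getTwosAndThrees line → Spec_getTwosAndThrees line (getTwosAndThrees line)

-- ===== LEMMAS AND PROOFS =====

-- A's branchy update step is exactly Counter's modify step
lemma stepA_eq_counter_step (d : PySem.Dict Char Int) (ch : Char) :
    (if d.contains ch then d.modify ch 0 (· + 1) else d.insert ch 1) = d.modify ch 0 (· + 1) := by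
  by_cases h : d.contains ch
  · simp [h]
  · simp only [h, Bool.false_eq_true, if_false]
    simp only [PySem.Dict.modify, PySem.Dict.get?_eq_none_iff_contains, h,
      PySem.Dict.getD_of_get?_eq_none, zero_add]

lemma dictA_eq_counter (cs : List Char) :
    cs.foldl (fun d ch => if d.contains ch then d.modify ch 0 (· + 1) else d.insert ch 1)
      PySem.Dict.empty = PySem.Dict.counter cs := by
  rw [PySem.Dict.counter_eq_foldl]
  congr 1
  funext d ch
  exact stepA_eq_counter_step d ch

-- m is among the counter's values iff some character of the line occurs exactly m times
lemma mem_values_counter (cs : List Char) (m : Nat) :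
    ((m : Int) ∈ (PySem.Dict.counter cs).values) ↔ ∃ c ∈ cs, cs.count c = m := by
  have hv : (PySem.Dict.counter cs).values
      = (PySem.Set.ofList cs).map (fun k => (cs.count k : Int)) := by
    simp [PySem.Dict.values, PySem.Dict.items_counter]
  rw [hv]
  simp only [List.mem_map, PySem.Set.mem_ofList]
  constructor
  · rintro ⟨k, hk, hc⟩; exact ⟨k, hk, by exact_mod_cast hc⟩
  · rintro ⟨k, hk, hc⟩; exact ⟨k, hk, by exact_mod_cast hc⟩

lemma run_facts (c : Char) (rest : List Char) (h : (c :: rest).Pairwise (· ≤ ·)) :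
    ((c :: rest).count c = (rest.takeWhile (fun x => x == c)).length + 1)
    ∧ (rest.dropWhile (fun x => x == c)).Pairwise (· ≤ ·)
    ∧ (∀ x ∈ rest.dropWhile (fun x => x == c),
         x ≠ c ∧ (c :: rest).count x = (rest.dropWhile (fun x => x == c)).count x) := by
  have hsplit : rest.takeWhile (fun x => x == c) ++ rest.dropWhile (fun x => x == c) = rest :=
    List.takeWhile_append_dropWhile
  have htwc : ∀ x ∈ rest.takeWhile (fun x => x == c), x = c := by
    intro x hx
    have := List.mem_takeWhile_imp hx
    simpa using this
  have hdpair : (rest.dropWhile (fun x => x == c)).Pairwise (· ≤ ·) :=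
    List.Pairwise.sublist (List.dropWhile_sublist _) (List.Pairwise.of_cons h)
  have hmemr : ∀ x ∈ rest, c ≤ x := (List.pairwise_cons.mp h).1
  have hcnotd : c ∉ rest.dropWhile (fun x => x == c) := by
    intro hc
    cases hdd : rest.dropWhile (fun x => x == c) with
    | nil => rw [hdd] at hc; simp at hc
    | cons e d' =>
      rw [hdd] at hc hdpair
      have hef : (e == c) = false := by
        have := @List.head?_dropWhile_not Char (fun x => x == c) rest
        rw [hdd] at this; simpa using this
      have hec : e ≠ c := by simpa using hef
      have hce : c ≤ e := by
        refine hmemr e (List.Sublist.mem ?_ (List.dropWhile_sublist (fun x => x == c)))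
        rw [hdd]; simp
      rcases List.mem_cons.mp hc with rfl | hc'
      · exact hec rfl
      · exact hec (le_antisymm ((List.pairwise_cons.mp hdpair).1 c hc') hce)
  have hcount_tw : (rest.takeWhile (fun x => x == c)).count c
      = (rest.takeWhile (fun x => x == c)).length := by
    rw [List.count_eq_length]
    intro x hx; exact ((htwc x hx) ▸ rfl)
  have hrc : rest.count c = (rest.takeWhile (fun x => x == c)).length := by
    conv_lhs => rw [← hsplit]
    rw [List.count_append, hcount_tw, List.count_eq_zero.mpr hcnotd]
    omega
  refine ⟨?_, hdpair, ?_⟩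
  · rw [List.count_cons_self, hrc]
  · intro x hx
    have hxc : x ≠ c := fun hxc => hcnotd (hxc ▸ hx)
    refine ⟨hxc, ?_⟩
    have hrx : rest.count x = (rest.dropWhile (fun x => x == c)).count x := by
      conv_lhs => rw [← hsplit]
      rw [List.count_append, List.count_eq_zero.mpr (fun hxt => hxc (htwc x hxt)), Nat.zero_add]
    rw [List.count_cons, if_neg (fun hcx => hxc (eq_of_beq hcx).symm), Nat.add_zero, hrx]

lemma exists_count_iff (c : Char) (rest : List Char) (h : (c :: rest).Pairwise (· ≤ ·)) (m : Nat) :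
    (∃ x ∈ c :: rest, (c :: rest).count x = m)
      ↔ ((c :: rest).count c = m
          ∨ ∃ x ∈ rest.dropWhile (fun x => x == c), (rest.dropWhile (fun x => x == c)).count x = m) := by
  obtain ⟨hcc, _, hdx⟩ := run_facts c rest h
  constructor
  · rintro ⟨x, hx, hxm⟩
    rcases List.mem_cons.mp hx with rfl | hxr
    · exact Or.inl hxm
    · by_cases hxc : x = c
      · exact Or.inl (hxc ▸ hxm)
      · have hxd : x ∈ rest.dropWhile (fun x => x == c) := by
          have hxa : x ∈ rest.takeWhile (fun x => x == c) ++ rest.dropWhile (fun x => x == c) := by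
            rw [List.takeWhile_append_dropWhile]; exact hxr
          rcases List.mem_append.mp hxa with h1 | h2
          · exact absurd (by simpa using List.mem_takeWhile_imp h1) hxc
          · exact h2
        exact Or.inr ⟨x, hxd, ((hdx x hxd).2).symm.trans hxm⟩
  · rintro (hm | ⟨x, hxd, hxm⟩)
    · exact ⟨c, List.mem_cons_self, hm⟩
    · have hxr : x ∈ rest := (List.dropWhile_sublist _).mem hxd
      exact ⟨x, List.mem_cons_of_mem _ hxr, (hdx x hxd).2.trans hxm⟩


lemma pvRunLoop_spec (l : List Char) (h : l.Pairwise (· ≤ ·)) (t th : Bool) :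
    pvRunLoop l t th
      = (t || decide (∃ c ∈ l, l.count c = 2), th || decide (∃ c ∈ l, l.count c = 3)) := by
  induction l, t, th using pvRunLoop.induct with
  | case1 t th => simp [pvRunLoop]
  | case2 c rest t th run rest' hrun ih =>
    obtain ⟨hcc, hdp, _⟩ := run_facts c rest h
    have hc2 : (c :: rest).count c = 2 := by rw [hcc]; exact hrun
    simp only [pvRunLoop]
    rw [if_pos hrun, ih hdp]
    have h2 : decide (∃ x ∈ c :: rest, (c :: rest).count x = 2) = true :=
      decide_eq_true ((exists_count_iff c rest h 2).mpr (Or.inl hc2))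
    have h3 : (∃ x ∈ c :: rest, (c :: rest).count x = 3)
        ↔ (∃ x ∈ rest.dropWhile (fun x => x == c),
            (rest.dropWhile (fun x => x == c)).count x = 3) := by
      rw [exists_count_iff c rest h 3, hc2]; simp
    have hsnd : decide (∃ x ∈ rest', List.count x rest' = 3)
        = decide (∃ x ∈ c :: rest, List.count x (c :: rest) = 3) :=
      decide_eq_decide.mpr h3.symm
    rw [h2, hsnd]
    simp
  | case3 c rest t th run rest' hrun h2 ih =>
    obtain ⟨hcc, hdp, _⟩ := run_facts c rest h
    have hc3 : (c :: rest).count c = 3 := by rw [hcc]; exact h2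
    simp only [pvRunLoop]
    rw [if_neg hrun, if_pos h2, ih hdp]
    have e3 : decide (∃ x ∈ c :: rest, (c :: rest).count x = 3) = true :=
      decide_eq_true ((exists_count_iff c rest h 3).mpr (Or.inl hc3))
    have e2 : (∃ x ∈ c :: rest, (c :: rest).count x = 2)
        ↔ (∃ x ∈ rest.dropWhile (fun x => x == c),
            (rest.dropWhile (fun x => x == c)).count x = 2) := by
      rw [exists_count_iff c rest h 2, hc3]; simp
    have hfst : decide (∃ x ∈ rest', List.count x rest' = 2)
        = decide (∃ x ∈ c :: rest, List.count x (c :: rest) = 2) :=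
      decide_eq_decide.mpr e2.symm
    rw [e3, hfst]
    simp
  | case4 c rest t th run rest' h2 h3 ih =>
    obtain ⟨hcc, hdp, _⟩ := run_facts c rest h
    simp only [pvRunLoop]
    rw [if_neg h2, if_neg h3, ih hdp]
    have e2 : (∃ x ∈ c :: rest, (c :: rest).count x = 2)
        ↔ (∃ x ∈ rest.dropWhile (fun x => x == c),
            (rest.dropWhile (fun x => x == c)).count x = 2) := by
      rw [exists_count_iff c rest h 2, hcc]
      constructor
      · rintro (hl | hr)
        · exact absurd hl h2
        · exact hr
      · exact Or.inr
    have e3 : (∃ x ∈ c :: rest, (c :: rest).count x = 3)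
        ↔ (∃ x ∈ rest.dropWhile (fun x => x == c),
            (rest.dropWhile (fun x => x == c)).count x = 3) := by
      rw [exists_count_iff c rest h 3, hcc]
      constructor
      · rintro (hl | hr)
        · exact absurd hl h3
        · exact hr
      · exact Or.inr
    have hfst : decide (∃ x ∈ rest', List.count x rest' = 2)
        = decide (∃ x ∈ c :: rest, List.count x (c :: rest) = 2) :=
      decide_eq_decide.mpr e2.symm
    have hsnd : decide (∃ x ∈ rest', List.count x rest' = 3)
        = decide (∃ x ∈ c :: rest, List.count x (c :: rest) = 3) :=
      decide_eq_decide.mpr e3.symm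
    rw [hfst, hsnd]

-- ===== VERDICT (by name: the statement is the Claim_ definition above) =====
theorem getTwosAndThrees_spec : Claim_equal_getTwosAndThrees := by
  intro line _
  unfold Spec_getTwosAndThrees getTwosAndThrees getTwosAndThrees_alt
  simp only [dictA_eq_counter]
  have hpair : (PySem.List.sorted line.toList (fun c => c) false).Pairwise (· ≤ ·) :=
    PySem.List.sorted_pairwise _ _
  have hperm : (PySem.List.sorted line.toList (fun c => c) false).Perm line.toList :=
    PySem.List.sorted_perm _ _ _
  rw [pvRunLoop_spec _ hpair]
  have key : ∀ m : Nat,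
      ((m : Int) ∈ (PySem.Dict.counter line.toList).values)
        ↔ (∃ c ∈ PySem.List.sorted line.toList (fun c => c) false,
            (PySem.List.sorted line.toList (fun c => c) false).count c = m) := by
    intro m
    rw [mem_values_counter]
    constructor
    · rintro ⟨k, hk, hc⟩
      exact ⟨k, hperm.mem_iff.mpr hk, (hperm.count_eq k).trans hc⟩
    · rintro ⟨k, hk, hc⟩
      exact ⟨k, hperm.mem_iff.mp hk, ((hperm.count_eq k).symm.trans hc)⟩
  have k2 := (key 2).trans (decide_eq_true_iff).symm
  have k3 := (key 3).trans (decide_eq_true_iff).symm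
  push_cast at k2 k3
  simp only [Bool.false_or]
  rw [if_congr k2 rfl rfl, if_congr k3 rfl rfl]
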